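-- pv_equiv track=rewrite | github.com/k-xlsx/sudoku-solver | src/sudoku/sudoku.py | _get_vertical_nums
-- ===== SOURCE A (Python) =====
-- emptySpotChar = '0'
--
-- _constMarker = '$'
--
-- def _get_vertical_nums(board):
--     """
--     Returns a list of nums in corresponding vertical lines.
--
--     Arguments:
--         board {tuple of lists} -- current board
--
--     Returns:
--         {tuple of sets} -- tuple contains sets of nums in corresponding columns
--     """
--
--     # empty list the same size as the board but filled with empty lists|
--     verticals = [set()
--                  for row in board]
--
--     for elNum in range(len(board)):
--         for rowNum in range(len(board)):
--             # adds only nums to save time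
--             if board[rowNum][elNum] != emptySpotChar:
--                 verticals[elNum].add(board[rowNum][elNum].replace(_constMarker, ''))
--
--     return tuple(verticals)
-- ===== SOURCE B (Python) =====
-- def _get_vertical_nums(board):
--     # peel the leading column off the rows, collect its set, and recurse on
--     # the remaining columns (functional-transpose style), n times in total
--     def cols(rows, k):
--         if k == 0:
--             return []
--         first = {r[0].replace('$', '') for r in rows if r[0] != '0'}
--         return [first] + cols([r[1:] for r in rows], k - 1)
--     return tuple(cols(list(board), len(board)))
-- ===== Notes on version B (the rewrite author's own statement) =====
-- stated objective: alternative
-- what changed: A preallocates per-column sets and fills them with an index-based column-outer/row-inner double loop; B is a recursive functional transpose that peels the leading column off the rows, collects it with one set comprehension and recurses on the rest of the columns.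
import Mathlib
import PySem

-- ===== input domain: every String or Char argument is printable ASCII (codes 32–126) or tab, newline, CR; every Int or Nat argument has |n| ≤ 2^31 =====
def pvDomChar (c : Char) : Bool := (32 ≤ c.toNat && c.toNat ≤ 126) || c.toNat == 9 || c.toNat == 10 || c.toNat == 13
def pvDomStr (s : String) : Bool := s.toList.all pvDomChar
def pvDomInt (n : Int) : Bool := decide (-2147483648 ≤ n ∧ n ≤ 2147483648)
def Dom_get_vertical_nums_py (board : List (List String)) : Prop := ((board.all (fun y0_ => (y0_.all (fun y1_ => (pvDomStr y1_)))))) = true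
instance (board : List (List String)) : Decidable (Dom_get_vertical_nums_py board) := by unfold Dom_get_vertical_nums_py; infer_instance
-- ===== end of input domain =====

-- B replaces A's index-based column-outer/row-inner double loop that mutates preallocated
-- sets by a recursive transpose that peels the leading column off the rows and collects it
-- with a set comprehension (objective: alternative).

-- ===== PORT A =====
-- 'if cell != "0": verticals[elNum].add(cell.replace("$",""))' (sets are PySem.Set, insertion order)
def get_vertical_nums_py (board : List (List String)) : List (List String) :=
  let n : Int := board.length
  let verticals : List (PySem.Set String) := board.map (fun _ => PySem.Set.empty)
  (PySem.List.pyRange 0 n 1).foldl (fun vs e =>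
    (PySem.List.pyRange 0 n 1).foldl (fun vs2 r =>
      let cell := PySem.List.pyGetD (PySem.List.pyGetD board r []) e ""
      if cell ≠ "0" then
        PySem.List.pySetD vs2 e
          (PySem.Set.add (PySem.List.pyGetD vs2 e PySem.Set.empty) (PySem.Str.replace cell "$" ""))
      else vs2) vs) verticals

-- ===== PORT B =====
-- 'first = {r[0].replace('$','') for r in rows if r[0] != '0'}; [first] + cols([r[1:] ...], k-1)'
-- (r[0] ported as pyGetD r 0 "" — total form, exact under Pre_; r[1:] is List.drop 1)
def pvCols (rows : List (List String)) (k : Nat) : List (List String) :=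
  match k with
  | 0 => []
  | k + 1 =>
    (PySem.Set.ofList ((rows.filter (fun r => PySem.List.pyGetD r 0 "" != "0")).map
        (fun r => PySem.Str.replace (PySem.List.pyGetD r 0 "") "$" ""))) ::
      pvCols (rows.map (fun r => r.drop 1)) k

def get_vertical_nums_py_alt (board : List (List String)) : List (List String) :=
  pvCols board board.length

-- ===== PRECONDITION & SPEC =====
-- A indexes board[rowNum][elNum] for all rowNum, elNum < len(board): it raises IndexError
-- exactly when some row is shorter than the board, so Pre_ admits precisely the inputs A returns on.
def Pre_get_vertical_nums_py (board : List (List String)) : Prop :=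
  ∀ row ∈ board, board.length ≤ row.length
instance (board : List (List String)) : Decidable (Pre_get_vertical_nums_py board) := by
  unfold Pre_get_vertical_nums_py; infer_instance
def pvWitness_get_vertical_nums_py : List (List String) := [["1", "0"], ["$2", "3"]]

def Spec_get_vertical_nums_py (board : List (List String)) (out : List (List String)) : Prop := out = get_vertical_nums_py_alt board
instance (board : List (List String)) (out : List (List String)) : Decidable (Spec_get_vertical_nums_py board out) := by unfold Spec_get_vertical_nums_py; infer_instance

-- ===== CLAIM (what is proved, stated in full; the proofs are below) =====
def Claim_equal_get_vertical_nums_py : Prop := ∀ (board : List (List String)), Dom_get_vertical_nums_py board → Pre_get_vertical_nums_py board → Spec_get_vertical_nums_py board (get_vertical_nums_py board)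

-- ===== LEMMAS AND PROOFS =====

-- the per-column accumulation step of A
def pvStep (s : PySem.Set String) (c : String) : PySem.Set String :=
  if c ≠ "0" then PySem.Set.add s (PySem.Str.replace c "$" "") else s

-- the i-th column as a list (row order)
def pvCol (board : List (List String)) (i : Nat) : List String :=
  board.map (fun r => r.getD i "")

theorem pvInner (cf : Int → String) (L : List Int) (vs : List (PySem.Set String))
    (e : Nat) (he : e < vs.length) :
    L.foldl (fun vs2 r =>
      if cf r ≠ "0" then
        vs2.set e ((vs2.getD e PySem.Set.empty).add (PySem.Str.replace (cf r) "$" ""))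
      else vs2) vs
    = vs.set e ((L.map cf).foldl pvStep (vs.getD e PySem.Set.empty)) := by
  induction L generalizing vs with
  | nil =>
    simp only [List.foldl_nil, List.map_nil]
    rw [List.getD_eq_getElem _ _ he, List.set_getElem_self]
  | cons r L ih =>
    simp only [List.foldl_cons, List.map_cons]
    by_cases h0 : cf r ≠ "0"
    · rw [if_pos h0, ih _ (by simpa using he), List.set_set]
      congr 1
      unfold pvStep
      rw [if_pos h0]
      congr 1
      rw [List.getD_eq_getElem _ _ (by simpa using he)]
      simp
    · rw [if_neg h0, ih _ he]
      congr 1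
      unfold pvStep
      rw [if_neg h0]

theorem pvOuter (board : List (List String)) (k : Nat) (hk : k ≤ board.length) :
    (PySem.List.pyRange 0 (k : Int) 1).foldl (fun vs e =>
      (PySem.List.pyRange 0 (board.length : Int) 1).foldl (fun vs2 r =>
        let cell := PySem.List.pyGetD (PySem.List.pyGetD board r []) e ""
        if cell ≠ "0" then
          PySem.List.pySetD vs2 e
            (PySem.Set.add (PySem.List.pyGetD vs2 e PySem.Set.empty) (PySem.Str.replace cell "$" ""))
        else vs2) vs) (board.map (fun _ => PySem.Set.empty))
    = (List.range board.length).map (fun i =>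
        if i < k then (pvCol board i).foldl pvStep PySem.Set.empty else PySem.Set.empty) := by
  induction k with
  | zero =>
    rw [show PySem.List.pyRange 0 ((0:Nat):Int) 1 = [] from PySem.List.pyRange_one_eq_nil (by omega)]
    simp only [List.foldl_nil]
    apply List.ext_getElem
    · simp
    · intro i h1 h2
      simp
  | succ k ih =>
    have hk' : k ≤ board.length := by omega
    have hcast : ((k + 1 : Nat) : Int) = (k : Int) + 1 := by push_cast; ring
    rw [hcast, PySem.List.pyRange_one_succ_right (a := 0) (b := (k : Int)) (by omega), List.foldl_append]
    rw [ih hk']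
    simp only [List.foldl_cons, List.foldl_nil]
    simp only [PySem.List.pySetD_natCast, PySem.List.pyGetD_natCast]
    rw [pvInner (fun r => (PySem.List.pyGetD board r []).getD k "") _ _ k (by simpa using hk)]
    have hmap : (PySem.List.pyRange 0 (board.length : Int) 1).map
        (fun r => (PySem.List.pyGetD board r []).getD k "") = pvCol board k := by
      have := PySem.List.map_pyGetD_pyRange_zero' (xs := board) (d := ([] : List String))
      calc (PySem.List.pyRange 0 (board.length : Int) 1).map
            (fun r => (PySem.List.pyGetD board r []).getD k "")
          = ((PySem.List.pyRange 0 (board.length : Int) 1).map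
              (fun r => PySem.List.pyGetD board r [])).map (fun row => row.getD k "") := by
            rw [List.map_map]; rfl
        _ = pvCol board k := by rw [this]; rfl
    have hgetD : ((List.range board.length).map (fun i =>
        if i < k then (pvCol board i).foldl pvStep PySem.Set.empty else PySem.Set.empty)).getD k
        PySem.Set.empty = PySem.Set.empty := by
      rw [List.getD_eq_getElem _ _ (by simpa using hk)]
      simp
    rw [hmap, hgetD]
    apply List.ext_getElem
    · simp
    · intro i h1 h2
      simp only [List.length_map, List.length_range] at h1 h2
      rw [List.getElem_set, List.getElem_map, List.getElem_map]
      simp only [List.getElem_range]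
      by_cases hik : k = i
      · subst hik
        rw [if_pos rfl, if_pos (by omega)]
      · rw [if_neg hik]
        by_cases hlt : i < k
        · rw [if_pos hlt, if_pos (by omega)]
        · rw [if_neg hlt, if_neg (by omega)]

-- A's incremental set building per column equals B's comprehension over that column
theorem pvColFold (col : List String) (s : PySem.Set String) :
    col.foldl pvStep s
    = ((col.filter (fun c => c != "0")).map (fun c => PySem.Str.replace c "$" "")).foldl
        PySem.Set.add s := by
  induction col generalizing s with
  | nil => rfl
  | cons c col ih =>
    by_cases h0 : c = "0"
    · subst h0
      simp only [List.foldl_cons, List.filter_cons]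
      rw [show (("0" : String) != "0") = false from by decide]
      simp only [if_neg (by decide : ¬ (false = true))]
      rw [show pvStep s "0" = s from by unfold pvStep; simp]
      exact ih s
    · simp only [List.foldl_cons, List.filter_cons]
      rw [show (c != "0") = true from by simpa using h0]
      simp only [if_pos (trivial : True), List.map_cons, List.foldl_cons]
      rw [show pvStep s c = PySem.Set.add s (PySem.Str.replace c "$" "") from by
        unfold pvStep; rw [if_pos h0]]
      exact ih _

theorem pvGet0 (r : List String) : PySem.List.pyGetD r (0 : Int) "" = r.getD 0 "" := by
  have h := PySem.List.pyGetD_natCast (xs := r) (n := 0) (d := "")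
  simpa using h

-- each peeled set is the set comprehension over the i-th column
theorem pvColsChar (k : Nat) (rows : List (List String)) :
    pvCols rows k
    = (List.range k).map (fun i =>
        PySem.Set.ofList (((rows.map (fun r => r.getD i "")).filter (fun c => c != "0")).map
          (fun c => PySem.Str.replace c "$" ""))) := by
  induction k generalizing rows with
  | zero => simp [pvCols]
  | succ k ih =>
    rw [pvCols, ih, List.range_succ_eq_map]
    simp only [List.map_cons, List.map_map]
    congr 1
    · simp only [pvGet0, List.filter_map, List.map_map]
      rfl
    · apply List.map_congr_left
      intro i hi
      simp only [Function.comp_def, Function.comp_apply]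
      have hmap : rows.map (fun x => (x.drop 1).getD i "")
          = rows.map (fun r => r.getD (i + 1) "") := by
        apply List.map_congr_left
        intro r hr
        cases r with
        | nil => rfl
        | cons a t => simp
      rw [hmap]

theorem pvAltChar (board : List (List String)) :
    get_vertical_nums_py_alt board
    = (List.range board.length).map (fun i => (pvCol board i).foldl pvStep PySem.Set.empty) := by
  show pvCols board board.length = _
  rw [pvColsChar]
  apply List.map_congr_left
  intro i hi
  rw [pvColFold (pvCol board i) PySem.Set.empty]
  rfl

-- ===== VERDICT (by name: the statement is the Claim_ definition above) =====
theorem get_vertical_nums_py_spec : Claim_equal_get_vertical_nums_py := by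
  intro board _ hpre
  unfold Spec_get_vertical_nums_py
  rw [pvAltChar board]
  show (PySem.List.pyRange 0 (board.length : Int) 1).foldl _ _ = _
  rw [pvOuter board board.length le_rfl]
  apply List.map_congr_left
  intro i hi
  rw [if_pos (by simpa using hi)]
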